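-- pv_equiv track=rewrite | github.com/TANAVREDDY01/ResumeAnalyser | api/index.py | predict_field
-- ===== SOURCE A (Python) =====
-- DS_KW  = {'tensorflow','keras','pytorch','machine learning','deep learning','flask','streamlit','data science','nlp','scikit-learn','data analysis'}
--
-- WEB_KW = {'react','django','node','javascript','angular','vue','php','laravel','flask','html','css','typescript'}
--
-- AND_KW = {'android','flutter','kotlin','xml','kivy','java'}
--
-- IOS_KW = {'ios','swift','cocoa','xcode','objective-c'}
--
-- UX_KW  = {'ux','figma','adobe xd','zeplin','balsamiq','ui','prototyping','wireframes','photoshop','illustrator'}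
--
-- def predict_field(skills):
--     s = set(sk.lower() for sk in skills)
--     scores = {
--         'Data Science':        len(s & DS_KW),
--         'Web Development':     len(s & WEB_KW),
--         'Android Development': len(s & AND_KW),
--         'IOS Development':     len(s & IOS_KW),
--         'UI-UX Development':   len(s & UX_KW),
--     }
--     best = max(scores, key=scores.get)
--     return best if scores[best] > 0 else 'General'
-- ===== SOURCE B (Python) =====
-- # Inverted index: keyword -> list of fields whose keyword set contains it.
-- KW_INDEX = {
--     'tensorflow': ['Data Science'],
--     'keras': ['Data Science'],
--     'pytorch': ['Data Science'],
--     'machine learning': ['Data Science'],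
--     'deep learning': ['Data Science'],
--     'flask': ['Data Science', 'Web Development'],
--     'streamlit': ['Data Science'],
--     'data science': ['Data Science'],
--     'nlp': ['Data Science'],
--     'scikit-learn': ['Data Science'],
--     'data analysis': ['Data Science'],
--     'react': ['Web Development'],
--     'django': ['Web Development'],
--     'node': ['Web Development'],
--     'javascript': ['Web Development'],
--     'angular': ['Web Development'],
--     'vue': ['Web Development'],
--     'php': ['Web Development'],
--     'laravel': ['Web Development'],
--     'html': ['Web Development'],
--     'css': ['Web Development'],
--     'typescript': ['Web Development'],
--     'android': ['Android Development'],
--     'flutter': ['Android Development'],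
--     'kotlin': ['Android Development'],
--     'xml': ['Android Development'],
--     'kivy': ['Android Development'],
--     'java': ['Android Development'],
--     'ios': ['IOS Development'],
--     'swift': ['IOS Development'],
--     'cocoa': ['IOS Development'],
--     'xcode': ['IOS Development'],
--     'objective-c': ['IOS Development'],
--     'ux': ['UI-UX Development'],
--     'figma': ['UI-UX Development'],
--     'adobe xd': ['UI-UX Development'],
--     'zeplin': ['UI-UX Development'],
--     'balsamiq': ['UI-UX Development'],
--     'ui': ['UI-UX Development'],
--     'prototyping': ['UI-UX Development'],
--     'wireframes': ['UI-UX Development'],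
--     'photoshop': ['UI-UX Development'],
--     'illustrator': ['UI-UX Development'],
-- }
--
-- FIELDS = ['Data Science', 'Web Development', 'Android Development',
--           'IOS Development', 'UI-UX Development']
--
-- def predict_field(skills):
--     scores = {f: 0 for f in FIELDS}
--     for sk in set(x.lower() for x in skills):
--         for field in KW_INDEX.get(sk, ()):
--             scores[field] += 1
--     best = max(scores, key=scores.get)
--     return best if scores[best] > 0 else 'General'
-- ===== Notes on version B (the rewrite author's own statement) =====
-- stated objective: alternative
-- what changed: Replaces the five per-field set intersections with a precomputed inverted index KW_INDEX (keyword -> list of fields), a zero-initialized scores dict over the fields in order, and one membership-driven pass over the deduplicated lowercased skills that increments scores[field] for each field the index maps the skill to.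
import Mathlib
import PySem

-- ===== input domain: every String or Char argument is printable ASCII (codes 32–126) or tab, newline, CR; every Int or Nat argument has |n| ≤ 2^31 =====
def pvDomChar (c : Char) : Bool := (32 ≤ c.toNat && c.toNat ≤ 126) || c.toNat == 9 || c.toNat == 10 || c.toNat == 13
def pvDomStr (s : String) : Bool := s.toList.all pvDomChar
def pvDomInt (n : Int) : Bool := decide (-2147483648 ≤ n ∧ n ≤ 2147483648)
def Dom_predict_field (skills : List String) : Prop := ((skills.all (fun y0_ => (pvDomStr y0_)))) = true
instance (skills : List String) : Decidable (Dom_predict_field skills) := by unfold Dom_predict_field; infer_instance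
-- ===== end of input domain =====

-- B replaces A's five set intersections with a precomputed inverted index KW_INDEX
-- (keyword -> fields), a zero-initialized scores dict over the fields in order, and one
-- index-driven pass over the deduplicated lowercased skills; alternative, not claimed faster.


-- ===== PORT A =====
-- the module-level keyword sets (set LITERALS: only ever used for membership / intersection length, so order is irrelevant)
def DS_KW : List String := ["tensorflow","keras","pytorch","machine learning","deep learning","flask","streamlit","data science","nlp","scikit-learn","data analysis"]
def WEB_KW : List String := ["react","django","node","javascript","angular","vue","php","laravel","flask","html","css","typescript"]
def AND_KW : List String := ["android","flutter","kotlin","xml","kivy","java"]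
def IOS_KW : List String := ["ios","swift","cocoa","xcode","objective-c"]
def UX_KW : List String := ["ux","figma","adobe xd","zeplin","balsamiq","ui","prototyping","wireframes","photoshop","illustrator"]

-- max(scores, key=scores.get) over a dict: first key with maximal value, in insertion order
-- (scores.get k is some value for every key of the dict, so getD _ 0 reads exactly that value)
def pyMaxByVal (scores : PySem.Dict String Int) : String :=
  match scores.keys with
  | [] => ""  -- Python raises on an empty dict; unreachable here (the dict has five keys)
  | k :: ks => ks.foldl (fun best k' => if scores.getD k' 0 > scores.getD best 0 then k' else best) k

def predict_field (skills : List String) : String :=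
  let s : PySem.Set String := PySem.Set.ofList (skills.map PySem.Str.lower)
  let scores : PySem.Dict String Int :=
    ((((PySem.Dict.empty.insert "Data Science" ((PySem.Set.inter s DS_KW).length : Int)).insert
        "Web Development" ((PySem.Set.inter s WEB_KW).length : Int)).insert
        "Android Development" ((PySem.Set.inter s AND_KW).length : Int)).insert
        "IOS Development" ((PySem.Set.inter s IOS_KW).length : Int)).insert
        "UI-UX Development" ((PySem.Set.inter s UX_KW).length : Int)
  let best := pyMaxByVal scores
  if scores.getD best 0 > 0 then best else "General"

-- ===== PORT B =====
-- the inverted index (a dict LITERAL in Source B)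
def KW_INDEX : PySem.Dict String (List String) := PySem.Dict.ofList [
  ("tensorflow", ["Data Science"]),
  ("keras", ["Data Science"]),
  ("pytorch", ["Data Science"]),
  ("machine learning", ["Data Science"]),
  ("deep learning", ["Data Science"]),
  ("flask", ["Data Science", "Web Development"]),
  ("streamlit", ["Data Science"]),
  ("data science", ["Data Science"]),
  ("nlp", ["Data Science"]),
  ("scikit-learn", ["Data Science"]),
  ("data analysis", ["Data Science"]),
  ("react", ["Web Development"]),
  ("django", ["Web Development"]),
  ("node", ["Web Development"]),
  ("javascript", ["Web Development"]),
  ("angular", ["Web Development"]),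
  ("vue", ["Web Development"]),
  ("php", ["Web Development"]),
  ("laravel", ["Web Development"]),
  ("html", ["Web Development"]),
  ("css", ["Web Development"]),
  ("typescript", ["Web Development"]),
  ("android", ["Android Development"]),
  ("flutter", ["Android Development"]),
  ("kotlin", ["Android Development"]),
  ("xml", ["Android Development"]),
  ("kivy", ["Android Development"]),
  ("java", ["Android Development"]),
  ("ios", ["IOS Development"]),
  ("swift", ["IOS Development"]),
  ("cocoa", ["IOS Development"]),
  ("xcode", ["IOS Development"]),
  ("objective-c", ["IOS Development"]),
  ("ux", ["UI-UX Development"]),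
  ("figma", ["UI-UX Development"]),
  ("adobe xd", ["UI-UX Development"]),
  ("zeplin", ["UI-UX Development"]),
  ("balsamiq", ["UI-UX Development"]),
  ("ui", ["UI-UX Development"]),
  ("prototyping", ["UI-UX Development"]),
  ("wireframes", ["UI-UX Development"]),
  ("photoshop", ["UI-UX Development"]),
  ("illustrator", ["UI-UX Development"])
]

def FIELDS : List String := ["Data Science", "Web Development", "Android Development",
  "IOS Development", "UI-UX Development"]

-- one skill's contribution: scores[field] += 1 for each field KW_INDEX maps it to
-- (scores[field] += 1 ported as modify with default 0: every value of KW_INDEX is a key of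
-- scores, so the default is never consulted and Python's KeyError path is unreachable)
def pvBStep (scores : PySem.Dict String Int) (sk : String) : PySem.Dict String Int :=
  (KW_INDEX.getD sk []).foldl (fun sc f => sc.modify f 0 (· + 1)) scores

def predict_field_alt (skills : List String) : String :=
  let scores0 : PySem.Dict String Int := FIELDS.foldl (fun d f => d.insert f 0) PySem.Dict.empty
  -- 'for sk in set(...)' — the result is independent of the set's iteration order
  let scores := (PySem.Set.ofList (skills.map PySem.Str.lower)).foldl pvBStep scores0
  let best := pyMaxByVal scores
  if scores.getD best 0 > 0 then best else "General"

-- ===== PRECONDITION & SPEC =====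
def Spec_predict_field (skills : List String) (out : String) : Prop := out = predict_field_alt skills
instance (skills : List String) (out : String) : Decidable (Spec_predict_field skills out) := by unfold Spec_predict_field; infer_instance

-- ===== CLAIM (what is proved, stated in full; the proofs are below) =====
def Claim_equal_predict_field : Prop := ∀ (skills : List String), Dom_predict_field skills → Spec_predict_field skills (predict_field skills)

-- ===== LEMMAS AND PROOFS =====
set_option maxRecDepth 8192

-- the inverted index, characterized pointwise: its value at ANY string sk is determined by
-- which keyword sets contain sk (DS first, then WEB, AND, IOS, UX — the order of the literal)
def pvKEYS : List String := ["tensorflow", "keras", "pytorch", "machine learning", "deep learning", "flask", "streamlit", "data science", "nlp", "scikit-learn", "data analysis", "react", "django", "node", "javascript", "angular", "vue", "php", "laravel", "html", "css", "typescript", "android", "flutter", "kotlin", "xml", "kivy", "java", "ios", "swift", "cocoa", "xcode", "objective-c", "ux", "figma", "adobe xd", "zeplin", "balsamiq", "ui", "prototyping", "wireframes", "photoshop", "illustrator"]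

set_option maxRecDepth 8192 in
theorem pv_idx (sk : String) : KW_INDEX.getD sk [] =
    (if DS_KW.contains sk then ["Data Science"] else []) ++
    (if WEB_KW.contains sk then ["Web Development"] else []) ++
    (if AND_KW.contains sk then ["Android Development"] else []) ++
    (if IOS_KW.contains sk then ["IOS Development"] else []) ++
    (if UX_KW.contains sk then ["UI-UX Development"] else []) := by
  by_cases h : sk ∈ pvKEYS
  · fin_cases h <;> decide
  · have hk : KW_INDEX.keys = pvKEYS := by decide
    have hc : KW_INDEX.contains sk = false := by
      rw [PySem.Dict.contains_eq_decide_mem_keys, hk]; simpa using h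
    have hd : KW_INDEX.getD sk [] = [] := PySem.Dict.getD_of_not_contains KW_INDEX [] hc
    have hds : sk ∉ DS_KW := fun hm => h (by fin_cases hm <;> decide)
    have hweb : sk ∉ WEB_KW := fun hm => h (by fin_cases hm <;> decide)
    have hand : sk ∉ AND_KW := fun hm => h (by fin_cases hm <;> decide)
    have hios : sk ∉ IOS_KW := fun hm => h (by fin_cases hm <;> decide)
    have hux : sk ∉ UX_KW := fun hm => h (by fin_cases hm <;> decide)
    simp [hd, hds, hweb, hand, hios, hux]

-- count of a field name in KW_INDEX[sk] = whether sk is one of that field's keywords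
theorem pv_cnt_ds (sk : String) : (KW_INDEX.getD sk []).count "Data Science" = if DS_KW.contains sk then 1 else 0 := by
  rw [pv_idx]; split_ifs <;> simp_all
theorem pv_cnt_web (sk : String) : (KW_INDEX.getD sk []).count "Web Development" = if WEB_KW.contains sk then 1 else 0 := by
  rw [pv_idx]; split_ifs <;> simp_all
theorem pv_cnt_and (sk : String) : (KW_INDEX.getD sk []).count "Android Development" = if AND_KW.contains sk then 1 else 0 := by
  rw [pv_idx]; split_ifs <;> simp_all
theorem pv_cnt_ios (sk : String) : (KW_INDEX.getD sk []).count "IOS Development" = if IOS_KW.contains sk then 1 else 0 := by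
  rw [pv_idx]; split_ifs <;> simp_all
theorem pv_cnt_ux (sk : String) : (KW_INDEX.getD sk []).count "UI-UX Development" = if UX_KW.contains sk then 1 else 0 := by
  rw [pv_idx]; split_ifs <;> simp_all

-- every field KW_INDEX mentions is one of the five FIELDS
theorem pv_idx_fields (sk : String) : ∀ f ∈ KW_INDEX.getD sk [], f ∈ FIELDS := by
  rw [pv_idx]; intro f hf
  split_ifs at hf <;> simp_all [FIELDS] <;> tauto

-- the inner increment loop never adds a key when its targets are already keys
theorem pv_keys_inner (fs : List String) (d : PySem.Dict String Int)
    (hfs : ∀ f ∈ fs, f ∈ FIELDS) (hk : d.keys = FIELDS) :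
    (fs.foldl (fun sc f => sc.modify f 0 (· + 1)) d).keys = FIELDS := by
  induction fs generalizing d with
  | nil => exact hk
  | cons f fs ih =>
    simp only [List.foldl_cons]
    refine ih _ (fun g hg => hfs g (List.mem_cons_of_mem _ hg)) ?_
    have hc : d.contains f = true := by
      rw [PySem.Dict.contains_iff_mem_keys, hk]; exact hfs f (List.mem_cons_self ..)
    rw [PySem.Dict.keys_modify, PySem.Dict.keys_insert_of_contains d _ hc]; exact hk
theorem pv_keys_outer (s : List String) (d : PySem.Dict String Int) (hk : d.keys = FIELDS) :
    (s.foldl pvBStep d).keys = FIELDS := by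
  induction s generalizing d with
  | nil => exact hk
  | cons sk s ih =>
    simp only [List.foldl_cons]
    exact ih _ (pv_keys_inner _ _ (pv_idx_fields sk) hk)

-- the value at one field after the whole pass: initial value + number of skills that are
-- keywords of that field (uses PySem.Dict.getD_foldl_modify_add_one for the inner loop)
theorem pv_getD_outer (F : String) (K : List String)
    (hpt : ∀ sk, (KW_INDEX.getD sk []).count F = if K.contains sk then 1 else 0)
    (s : List String) (d : PySem.Dict String Int) :
    (s.foldl pvBStep d).getD F 0 = d.getD F 0 + (s.countP (fun sk => K.contains sk) : Int) := by
  induction s generalizing d with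
  | nil => simp
  | cons sk s ih =>
    simp only [List.foldl_cons, List.countP_cons]
    rw [ih]
    have h1 : (pvBStep d sk).getD F 0 = d.getD F 0 + ((KW_INDEX.getD sk []).count F : Int) := by
      simpa [pvBStep] using PySem.Dict.getD_foldl_modify_add_one (KW_INDEX.getD sk []) d F
    rw [h1, hpt]
    split_ifs <;> push_cast <;> ring
-- the intersection length A computes = the same count
theorem pv_inter_len (s : PySem.Set String) (K : List String) :
    (PySem.Set.inter s K).length = s.countP (fun y => K.contains y) := by
  simp [PySem.Set.inter, List.countP_eq_length_filter]

-- the two score dicts are EQUAL (same keys in the same order, same values), for any element list s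
theorem pv_dict_eq (s : List String) :
    ((((PySem.Dict.empty.insert "Data Science" ((PySem.Set.inter s DS_KW).length : Int)).insert
        "Web Development" ((PySem.Set.inter s WEB_KW).length : Int)).insert
        "Android Development" ((PySem.Set.inter s AND_KW).length : Int)).insert
        "IOS Development" ((PySem.Set.inter s IOS_KW).length : Int)).insert
        "UI-UX Development" ((PySem.Set.inter s UX_KW).length : Int)
    = s.foldl pvBStep (FIELDS.foldl (fun d f => d.insert f 0) PySem.Dict.empty) := by
  set dA := ((((PySem.Dict.empty.insert "Data Science" ((PySem.Set.inter s DS_KW).length : Int)).insert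
        "Web Development" ((PySem.Set.inter s WEB_KW).length : Int)).insert
        "Android Development" ((PySem.Set.inter s AND_KW).length : Int)).insert
        "IOS Development" ((PySem.Set.inter s IOS_KW).length : Int)).insert
        "UI-UX Development" ((PySem.Set.inter s UX_KW).length : Int) with hdA
  set dB := s.foldl pvBStep (FIELDS.foldl (fun d f => d.insert f 0) PySem.Dict.empty) with hdB
  have hkA : dA.keys = FIELDS := by
    simp [hdA, FIELDS, PySem.Dict.keys_insert_of_not_contains, PySem.Dict.contains_insert,
      PySem.Dict.contains_empty, PySem.Dict.keys_empty]
  have hk0 : (FIELDS.foldl (fun d f => d.insert f 0) PySem.Dict.empty).keys = FIELDS := by decide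
  have hkB : dB.keys = FIELDS := pv_keys_outer s _ hk0
  have hnd : FIELDS.Nodup := by decide
  have h0 : ∀ F : String, (FIELDS.foldl (fun d f => d.insert f 0) PySem.Dict.empty).getD F (0 : Int) = 0 := by
    intro F
    simp only [FIELDS, List.foldl_cons, List.foldl_nil]
    simp [PySem.Dict.getD_insert]
  have hvals : ∀ F ∈ FIELDS, dA.getD F 0 = dB.getD F 0 := by
    intro F hF
    rcases (show F = "Data Science" ∨ F = "Web Development" ∨ F = "Android Development" ∨
        F = "IOS Development" ∨ F = "UI-UX Development" from by simpa [FIELDS] using hF) with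
      rfl | rfl | rfl | rfl | rfl
    · rw [hdB, pv_getD_outer _ DS_KW pv_cnt_ds s _, h0]
      simp [hdA, PySem.Dict.getD_insert, pv_inter_len]
    · rw [hdB, pv_getD_outer _ WEB_KW pv_cnt_web s _, h0]
      simp [hdA, PySem.Dict.getD_insert, pv_inter_len]
    · rw [hdB, pv_getD_outer _ AND_KW pv_cnt_and s _, h0]
      simp [hdA, PySem.Dict.getD_insert, pv_inter_len]
    · rw [hdB, pv_getD_outer _ IOS_KW pv_cnt_ios s _, h0]
      simp [hdA, PySem.Dict.getD_insert, pv_inter_len]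
    · rw [hdB, pv_getD_outer _ UX_KW pv_cnt_ux s _, h0]
      simp [hdA, pv_inter_len]
  apply PySem.Dict.ext
  rw [PySem.Dict.items_eq_map_keys dA (hkA ▸ hnd) 0, PySem.Dict.items_eq_map_keys dB (hkB ▸ hnd) 0,
    hkA, hkB]
  exact List.map_congr_left (fun F hF => by rw [hvals F hF])

-- ===== VERDICT (by name: the statement is the Claim_ definition above) =====
theorem predict_field_spec : Claim_equal_predict_field := by
  intro skills _
  simp only [Spec_predict_field, predict_field, predict_field_alt]
  rw [pv_dict_eq]
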